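-- pv_equiv track=rewrite | github.com/sunnytulakorn/Coding-by-Python | ComSci/Lab11_2_630510582.py | remove_row_col
-- ===== SOURCE A (Python) =====
-- import copy
--
-- def remove_row_col(list_a, row, col):
--     a = copy.deepcopy(list_a) # copy list_a
--     b = len(list_a) # row
--     c = len(list_a[0]) # col
--     if row < b and row >= -b: # condition
--         del a[row] # delete row
--     if col < c and col >= -c: # condition
--         for i in range(len(a)): # loop run
--             del a[i][col] # delete col
--     return a
-- ===== SOURCE B (Python) =====
-- import copy
--
-- def remove_row_col(list_a, row, col):
--     b = len(list_a)
--     c = len(list_a[0])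
--     r = row + b if (-b <= row < 0) else row
--     k = col + c if (-c <= col < 0) else col
--     drop_row = 0 <= r < b
--     drop_col = 0 <= k < c
--     return [[copy.deepcopy(x) for j, x in enumerate(rw) if not (drop_col and j == k)]
--             for i, rw in enumerate(list_a) if not (drop_row and i == r)]
-- ===== Notes on version B (the rewrite author's own statement) =====
-- stated objective: simpler
-- what changed: Instead of deep-copying the whole matrix and mutating it with del (per-row negative-index deletion inside a range loop), B normalizes the row/col indices once and builds the result directly with a single filtering comprehension over enumerate.
-- outside the precondition, e.g. on remove_row_col([], 0, 0): A raises IndexError, B raises IndexError; on remove_row_col([[1, 2], [3, 4, 5]], 5, -1): A returns [[1], [3, 4]], B returns [[1], [3, 5]]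
import Mathlib
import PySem

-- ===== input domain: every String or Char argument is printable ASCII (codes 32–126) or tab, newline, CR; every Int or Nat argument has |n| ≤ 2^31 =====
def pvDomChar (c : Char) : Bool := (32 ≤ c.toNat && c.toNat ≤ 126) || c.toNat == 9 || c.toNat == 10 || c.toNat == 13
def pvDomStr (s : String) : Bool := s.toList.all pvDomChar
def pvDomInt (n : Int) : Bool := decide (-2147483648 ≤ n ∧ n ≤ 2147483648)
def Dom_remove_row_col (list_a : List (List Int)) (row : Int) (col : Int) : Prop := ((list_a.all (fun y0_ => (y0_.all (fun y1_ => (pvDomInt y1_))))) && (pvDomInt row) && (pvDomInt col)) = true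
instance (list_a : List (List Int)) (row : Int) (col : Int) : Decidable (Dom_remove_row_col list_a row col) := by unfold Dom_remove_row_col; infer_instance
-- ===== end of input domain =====

-- B builds the result with one filtering pass over enumerate after normalizing the indices
-- once, instead of A's deepcopy-then-mutate with del (objective: simpler decomposition).

-- ===== PORT A =====
def remove_row_col (list_a : List (List Int)) (row : Int) (col : Int) : List (List Int) :=
  let a := list_a                                       -- copy.deepcopy: identity on an immutable value
  let b : Int := list_a.length
  let c : Int := ((list_a.headD []).length : Int)       -- list_a[0]; IndexError on [] is excluded by Pre_
  let a := if row < b ∧ -b ≤ row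
           then a.eraseIdx (if row < 0 then row + b else row).toNat   -- del a[row], Python index rule
           else a
  if col < c ∧ -c ≤ col then
    -- for i in range(len(a)): del a[i][col]  (per-row negative-index normalization)
    a.map (fun rw => rw.eraseIdx (if col < 0 then col + (rw.length : Int) else col).toNat)
  else a

-- ===== PORT B =====
def remove_row_col_alt (list_a : List (List Int)) (row : Int) (col : Int) : List (List Int) :=
  let b : Int := list_a.length
  let c : Int := ((list_a.headD []).length : Int)       -- list_a[0]; IndexError on [] is excluded by Pre_
  let r : Int := if -b ≤ row ∧ row < 0 then row + b else row
  let k : Int := if -c ≤ col ∧ col < 0 then col + c else col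
  let dropRow : Bool := decide (0 ≤ r ∧ r < b)
  let dropCol : Bool := decide (0 ≤ k ∧ k < c)
  ((PySem.List.enumerate list_a 0).filter (fun p => !(dropRow && p.1 == r))).map
    (fun p => ((PySem.List.enumerate p.2 0).filter (fun q => !(dropCol && q.1 == k))).map (·.2))

-- ===== PRECONDITION & SPEC =====
-- Pre_ excludes the empty matrix (A raises IndexError on len(list_a[0])) and, when the column
-- guard fires, ragged matrices with a too-short row (A raises IndexError on del a[i][col]) or a
-- negative col (A's per-row negative-index deletion, keyed to each row's own length instead of
-- the first-row length the guard tested, is an accident of the mutate-with-del implementation).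
def Pre_remove_row_col (list_a : List (List Int)) (row : Int) (col : Int) : Prop :=
  list_a ≠ [] ∧
    ((col < ((list_a.headD []).length : Int) ∧ -((list_a.headD []).length : Int) ≤ col) →
      if 0 ≤ col then ∀ rw ∈ list_a, col < (rw.length : Int)
      else ∀ rw ∈ list_a, rw.length = (list_a.headD []).length)
instance (list_a : List (List Int)) (row : Int) (col : Int) : Decidable (Pre_remove_row_col list_a row col) := by unfold Pre_remove_row_col; infer_instance

def pvWitness_remove_row_col : List (List Int) × Int × Int := ([[1, 2, 3], [4, 5, 6]], -1, 1)

def Spec_remove_row_col (list_a : List (List Int)) (row : Int) (col : Int) (out : List (List Int)) : Prop := out = remove_row_col_alt list_a row col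
instance (list_a : List (List Int)) (row : Int) (col : Int) (out : List (List Int)) : Decidable (Spec_remove_row_col list_a row col out) := by unfold Spec_remove_row_col; infer_instance

-- ===== CLAIM (what is proved, stated in full; the proofs are below) =====
def Claim_equal_remove_row_col : Prop := ∀ (list_a : List (List Int)) (row : Int) (col : Int), Dom_remove_row_col list_a row col → Pre_remove_row_col list_a row col → Spec_remove_row_col list_a row col (remove_row_col list_a row col)

-- ===== LEMMAS AND PROOFS =====

/-- Filtering out the entry with absolute index `m` from `enumerate xs s` and dropping the
indices is `eraseIdx` at position `m - s` (or the identity when `m < s`). -/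
lemma filt_enum {α : Type} (xs : List α) (s m : Int) :
    (((PySem.List.enumerate xs s).filter (fun p => !(p.1 == m))).map (·.2)) =
      if s ≤ m then xs.eraseIdx (m - s).toNat else xs := by
  induction xs generalizing s with
  | nil => simp [PySem.List.enumerate_nil]
  | cons x xs ih =>
    rw [PySem.List.enumerate_cons]
    by_cases hsm : s = m
    · subst hsm
      simp only [List.filter_cons, beq_self_eq_true, Bool.not_true, Bool.false_eq_true,
        if_false]
      rw [ih (s + 1)]
      have h2 : ¬ (s + 1 ≤ s) := by omega
      simp [h2]
    · have hne : ((s == m) : Bool) = false := by simpa using hsm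
      simp only [List.filter_cons, hne, Bool.not_false, if_true, List.map_cons]
      rw [ih (s + 1)]
      by_cases h1 : s + 1 ≤ m
      · have h0 : s ≤ m := by omega
        have : (m - s).toNat = (m - (s + 1)).toNat + 1 := by omega
        simp [h1, h0, this, List.eraseIdx_cons_succ]
      · have h0 : ¬ (s ≤ m) := by omega
        simp [h1, h0]

/-- The outer comprehension factors through dropping the enumeration indices first. -/
lemma map_snd_split (l : List (Int × List Int)) (k : Int) :
    l.map (fun p => ((PySem.List.enumerate p.2).filter (fun q => !(q.1 == k))).map (·.2))
      = (l.map (·.2)).map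
          (fun rw => ((PySem.List.enumerate rw).filter (fun q => !(q.1 == k))).map (·.2)) := by
  rw [List.map_map]; rfl

/-- Under the precondition, A's per-row deletion index agrees with the once-normalized `k`. -/
lemma col_idx_eq {list_a : List (List Int)} {col : Int} {rw : List Int}
    (hrect : (col < ((list_a.headD []).length : Int) ∧ -((list_a.headD []).length : Int) ≤ col) →
      if 0 ≤ col then ∀ rw ∈ list_a, col < (rw.length : Int)
      else ∀ rw ∈ list_a, rw.length = (list_a.headD []).length)
    (hcg : col < ((list_a.headD []).length : Int) ∧ -((list_a.headD []).length : Int) ≤ col)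
    (hmem : rw ∈ list_a) :
    (if col < 0 then col + (rw.length : Int) else col) =
      (if -((list_a.headD []).length : Int) ≤ col ∧ col < 0 then
        col + ((list_a.headD []).length : Int) else col) := by
  have h := hrect hcg
  by_cases h0 : 0 ≤ col
  · rw [if_neg (by omega : ¬ col < 0),
      if_neg (show ¬ (-((list_a.headD []).length : Int) ≤ col ∧ col < 0) by omega)]
  · rw [if_neg h0] at h
    have hlen : (rw.length : Int) = ((list_a.headD []).length : Int) := by
      exact_mod_cast congrArg (Nat.cast : Nat → Int) (h rw hmem)
    rw [hlen]
    split_ifs <;> omega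

theorem remove_row_col_spec : Claim_equal_remove_row_col := by
  intro list_a row col _ hpre
  obtain ⟨hne, hrect⟩ := hpre
  simp only [Spec_remove_row_col, remove_row_col, remove_row_col_alt]
  set b : Int := (list_a.length : Int) with hb
  set c : Int := ((list_a.headD []).length : Int) with hc
  set r : Int := if -b ≤ row ∧ row < 0 then row + b else row with hr
  set k : Int := if -c ≤ col ∧ col < 0 then col + c else col with hk
  have hb0 : 0 ≤ b := hb ▸ Int.natCast_nonneg _
  have hc0 : 0 ≤ c := hc ▸ Int.natCast_nonneg _
  have hrguard : (0 ≤ r ∧ r < b) ↔ (row < b ∧ -b ≤ row) := by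
    rw [hr]; split_ifs <;> omega
  have hkguard : (0 ≤ k ∧ k < c) ↔ (col < c ∧ -c ≤ col) := by
    rw [hk]; split_ifs <;> omega
  by_cases hrg : row < b ∧ -b ≤ row <;> by_cases hcg : col < c ∧ -c ≤ col
  · -- drop a row and a column
    have hdr : decide (0 ≤ r ∧ r < b) = true := by
      rw [decide_eq_true_eq]; exact hrguard.mpr hrg
    have hdc : decide (0 ≤ k ∧ k < c) = true := by
      rw [decide_eq_true_eq]; exact hkguard.mpr hcg
    have hr0 : 0 ≤ r := (hrguard.mpr hrg).1
    have hk0 : 0 ≤ k := (hkguard.mpr hcg).1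
    have hri : (if row < 0 then row + b else row) = r := by
      rw [hr]; split_ifs <;> omega
    simp only [hdr, hdc, Bool.true_and]
    rw [map_snd_split, filt_enum, if_pos hr0, sub_zero, if_pos hcg, if_pos hrg, hri]
    apply List.map_congr_left
    intro rw hmem
    have hmem' : rw ∈ list_a := List.mem_of_mem_eraseIdx hmem
    have hki : (if col < 0 then col + (rw.length : Int) else col) = k :=
      col_idx_eq hrect hcg hmem'
    rw [filt_enum, if_pos hk0, sub_zero, hki]
  · -- drop only a row
    have hdr : decide (0 ≤ r ∧ r < b) = true := by
      rw [decide_eq_true_eq]; exact hrguard.mpr hrg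
    have hdc : decide (0 ≤ k ∧ k < c) = false := by
      rw [decide_eq_false_iff_not]; exact fun h => hcg (hkguard.mp h)
    have hr0 : 0 ≤ r := (hrguard.mpr hrg).1
    have hri : (if row < 0 then row + b else row) = r := by
      rw [hr]; split_ifs <;> omega
    simp only [hdr, hdc, Bool.true_and, Bool.false_and, Bool.not_false,
      List.filter_true, PySem.List.map_snd_enumerate]
    rw [filt_enum, if_pos hr0, sub_zero, if_neg hcg, if_pos hrg, hri]
  · -- drop only a column
    have hdr : decide (0 ≤ r ∧ r < b) = false := by
      rw [decide_eq_false_iff_not]; exact fun h => hrg (hrguard.mp h)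
    have hdc : decide (0 ≤ k ∧ k < c) = true := by
      rw [decide_eq_true_eq]; exact hkguard.mpr hcg
    have hk0 : 0 ≤ k := (hkguard.mpr hcg).1
    simp only [hdr, hdc, Bool.true_and, Bool.false_and, Bool.not_false,
      List.filter_true]
    rw [map_snd_split, PySem.List.map_snd_enumerate, if_pos hcg, if_neg hrg]
    apply List.map_congr_left
    intro rw hmem
    have hki : (if col < 0 then col + (rw.length : Int) else col) = k :=
      col_idx_eq hrect hcg hmem
    rw [filt_enum, if_pos hk0, sub_zero, hki]
  · -- drop nothing
    have hdr : decide (0 ≤ r ∧ r < b) = false := by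
      rw [decide_eq_false_iff_not]; exact fun h => hrg (hrguard.mp h)
    have hdc : decide (0 ≤ k ∧ k < c) = false := by
      rw [decide_eq_false_iff_not]; exact fun h => hcg (hkguard.mp h)
    simp only [hdr, hdc, Bool.false_and, Bool.not_false, List.filter_true,
      PySem.List.map_snd_enumerate]
    rw [if_neg hcg, if_neg hrg]
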